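-- pv_equiv track=rewrite | github.com/RamitShivansh/hospital-bulk-processing-system | app/utils/openapi_auto.py | _flask_rule_to_openapi_path
-- ===== SOURCE A (Python) =====
-- def _flask_rule_to_openapi_path(rule: str) -> str:
--     """Convert Flask/Werkzeug route syntax to OpenAPI curly-brace parameters.
--
--     Examples:
--       /api/v1/hospitals/batch/<batch_id>/status -> /api/v1/hospitals/batch/{batch_id}/status
--       /items/<int:item_id> -> /items/{item_id}
--     """
--     out = []
--     i = 0
--     while i < len(rule):
--         if rule[i] == '<':
--             j = rule.find('>', i + 1)
--             if j == -1:
--                 out.append(rule[i:])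
--                 break
--             segment = rule[i + 1:j]
--             if ':' in segment:
--                 _, name = segment.split(':', 1)
--             else:
--                 name = segment
--             out.append('{')
--             out.append(name)
--             out.append('}')
--             i = j + 1
--         else:
--             out.append(rule[i])
--             i += 1
--     return ''.join(out)
-- ===== SOURCE B (Python) =====
-- def _flask_rule_to_openapi_path(rule: str) -> str:
--     parts = rule.split('>')
--     out = []
--     for part in parts[:-1]:
--         k = part.find('<')
--         if k == -1:
--             out.append(part + '>')
--         else:
--             seg = part[k + 1:]
--             out.append(part[:k] + '{' + seg[seg.find(':') + 1:] + '}')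
--     out.append(parts[-1])
--     return ''.join(out)
-- ===== Notes on version B (the rewrite author's own statement) =====
-- stated objective: faster
-- what changed: A's index-based while loop with per-character appending is replaced by one pass over the parts of rule.split using the closing bracket as separator, rebuilding each non-final part with find and slicing; the per-character Python loop disappears into C-level str.split/join.
import Mathlib
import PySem

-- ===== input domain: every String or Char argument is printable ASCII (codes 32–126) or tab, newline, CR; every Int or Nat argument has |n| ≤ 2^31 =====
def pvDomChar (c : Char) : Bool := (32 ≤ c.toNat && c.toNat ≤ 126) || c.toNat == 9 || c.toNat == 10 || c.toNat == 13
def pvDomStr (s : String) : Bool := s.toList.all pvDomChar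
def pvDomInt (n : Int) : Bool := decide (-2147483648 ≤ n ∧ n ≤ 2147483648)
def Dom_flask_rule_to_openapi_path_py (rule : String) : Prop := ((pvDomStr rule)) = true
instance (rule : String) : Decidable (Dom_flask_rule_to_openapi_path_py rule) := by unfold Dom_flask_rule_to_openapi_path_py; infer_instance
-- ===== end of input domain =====

-- B replaces A's per-character while loop by one pass over rule.split('>') (measurably faster by a constant factor: the scan moves into str.split/join).

-- ===== PORT A =====
-- A's while loop over index i becomes the obvious structural recursion on the remaining
-- suffix of the string; rule.find('>', i + 1) / the slices become the same operations
-- relative to that suffix (PySem.Chars.find / PySem.List.slice).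
def pvFlaskA : List Char → List Char
  | [] => []                                               -- while i < len(rule) exhausted
  | c :: rest =>
    if c = '<' then
      let j := PySem.Chars.find rest ['>']                 -- j = rule.find('>', i + 1)
      if j = -1 then
        c :: rest                                          -- out.append(rule[i:]); break
      else
        let segment := PySem.List.slice rest none (some j) -- segment = rule[i+1:j]
        let name :=
          if PySem.Chars.isIn [':'] segment then
            (PySem.Chars.splitOnMax segment [':'] 1).getD 1 []   -- _, name = segment.split(':', 1)
          else segment
        '{' :: (name ++ '}' :: pvFlaskA (PySem.List.slice rest (some (j + 1)) none))  -- i = j + 1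
    else
      c :: pvFlaskA rest                                   -- out.append(rule[i]); i += 1
termination_by cs => cs.length
decreasing_by
  · have h0 : (0:Int) ≤ j := by
      have := PySem.Chars.neg_one_le_find rest ['>']
      omega
    rw [PySem.List.slice_from rest (by omega : (0:Int) ≤ j + 1)]
    simp [List.length_drop]
  · simp

def flask_rule_to_openapi_path_py (rule : String) : String :=
  String.mk (pvFlaskA rule.toList)

-- ===== PORT B =====
-- one part of Source B's loop body (everything appended for a single part of rule.split('>'))
def pvPartB (part : List Char) : List Char :=
  let k := PySem.Chars.find part ['<']                     -- k = part.find('<')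
  if k = -1 then
    part ++ ['>']                                          -- out.append(part + '>')
  else
    let seg := PySem.List.slice part (some (k + 1)) none   -- seg = part[k+1:]
    PySem.List.slice part none (some k) ++                 -- part[:k] + '{' +
      '{' :: (PySem.List.slice seg (some (PySem.Chars.find seg [':'] + 1)) none  -- seg[seg.find(':')+1:]
        ++ ['}'])                                          -- + '}'

def flask_rule_to_openapi_path_py_alt (rule : String) : String :=
  let parts := PySem.Chars.splitOn rule.toList ['>']       -- parts = rule.split('>')
  String.mk (PySem.Chars.join []                           -- ''.join(out)
    (parts.dropLast.map pvPartB                            -- for part in parts[:-1]: out.append(…)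
      ++ [parts.getLastD []]))                             -- out.append(parts[-1])

-- ===== PRECONDITION & SPEC =====
def Spec_flask_rule_to_openapi_path_py (rule : String) (out : String) : Prop := out = flask_rule_to_openapi_path_py_alt rule
instance (rule : String) (out : String) : Decidable (Spec_flask_rule_to_openapi_path_py rule out) := by unfold Spec_flask_rule_to_openapi_path_py; infer_instance

-- ===== CLAIM (what is proved, stated in full; the proofs are below) =====
def Claim_equal_flask_rule_to_openapi_path_py : Prop := ∀ (rule : String), Dom_flask_rule_to_openapi_path_py rule → Spec_flask_rule_to_openapi_path_py rule (flask_rule_to_openapi_path_py rule)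

-- ===== LEMMAS AND PROOFS =====

-- join with the empty separator is flatten
lemma pvJoinNil : ∀ L : List (List Char), PySem.Chars.join [] L = L.flatten := by
  intro L
  induction L with
  | nil => rfl
  | cons x t ih =>
    cases t with
    | nil => simp [PySem.Chars.join, List.intercalate]
    | cons y t' =>
      rw [PySem.Chars.join_cons_cons, ih]
      simp

-- ---- facts about PySem.Chars.find for a single-character needle ----
lemma pvFindGoNot (c : Char) : ∀ (l : List Char) (k : Nat), c ∉ l →
    PySem.Chars.find.go [c] l k = -1 := by
  intro l
  induction l with
  | nil => intro k _; rw [PySem.Chars.find.go.eq_def]; simp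
  | cons x t ih =>
    intro k h
    have hx : ¬ (c = x) := by simp at h; tauto
    have ht : c ∉ t := by simp at h; tauto
    rw [PySem.Chars.find.go.eq_def]
    simp [List.isPrefixOf, hx]
    exact ih _ ht

lemma pvFindNot (c : Char) (l : List Char) (h : c ∉ l) :
    PySem.Chars.find l [c] = -1 := pvFindGoNot c l 0 h

lemma pvFindGoAt (c : Char) (b : List Char) : ∀ (a : List Char) (k : Nat), c ∉ a →
    PySem.Chars.find.go [c] (a ++ c :: b) k = (k : Int) + a.length := by
  intro a
  induction a with
  | nil =>
    intro k _
    rw [PySem.Chars.find.go.eq_def]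
    simp [List.isPrefixOf]
  | cons x t ih =>
    intro k h
    have hx : ¬ (c = x) := by simp at h; tauto
    have ht : c ∉ t := by simp at h; tauto
    rw [PySem.Chars.find.go.eq_def]
    simp only [List.cons_append, List.isPrefixOf]
    simp [hx]
    rw [ih (k + 1) ht]
    push_cast
    ring

lemma pvFindAt (c : Char) (a b : List Char) (h : c ∉ a) :
    PySem.Chars.find (a ++ c :: b) [c] = (a.length : Int) := by
  have := pvFindGoAt c b a 0 h
  simpa [PySem.Chars.find] using this

-- first-occurrence decomposition
lemma pvFirstOcc (c : Char) : ∀ (l : List Char), c ∈ l →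
    ∃ p q, l = p ++ c :: q ∧ c ∉ p := by
  intro l
  induction l with
  | nil => intro h; simp at h
  | cons x t ih =>
    intro h
    by_cases hx : x = c
    · exact ⟨[], t, by simp [hx], by simp⟩
    · have hm : c ∈ t := by
        rcases List.mem_cons.mp h with h1 | h1
        · exact absurd h1.symm hx
        · exact h1
      obtain ⟨p, q, hpq, hnp⟩ := ih hm
      refine ⟨x :: p, q, by simp [hpq], ?_⟩
      simp [hnp]
      exact fun he => hx he.symm

-- ---- split(':', 1): characterisation of PySem.Chars.splitOnMax seg [':'] 1 ----
lemma pvSplitMaxGo0 : ∀ (fuel : Nat) (q : List Char) (acc : List (List Char)),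
    PySem.Chars.splitOnMax.go [':'] fuel 0 q [] acc = (q :: acc).reverse := by
  intro fuel q acc
  cases fuel with
  | zero => rw [PySem.Chars.splitOnMax.go.eq_def]; simp
  | succ f =>
    cases q with
    | nil => rw [PySem.Chars.splitOnMax.go.eq_def]; simp
    | cons x r => rw [PySem.Chars.splitOnMax.go.eq_def]; simp

lemma pvSplitMaxGo1 (q : List Char) : ∀ (p : List Char) (fuel : Nat) (cur : List Char)
    (acc : List (List Char)), ':' ∉ p → (p ++ ':' :: q).length ≤ fuel →
    PySem.Chars.splitOnMax.go [':'] fuel 1 (p ++ ':' :: q) cur acc =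
      acc.reverse ++ [cur.reverse ++ p, q] := by
  intro p
  induction p with
  | nil =>
    intro fuel cur acc _ hf
    cases fuel with
    | zero => simp at hf
    | succ f =>
      rw [PySem.Chars.splitOnMax.go.eq_def]
      simp [List.isPrefixOf, pvSplitMaxGo0]
  | cons x t ih =>
    intro fuel cur acc h hf
    have hx : ¬ (':' = x) := by simp at h; tauto
    have ht : ':' ∉ t := by simp at h; tauto
    cases fuel with
    | zero => simp at hf
    | succ f =>
      rw [PySem.Chars.splitOnMax.go.eq_def]
      simp only [List.cons_append, List.isPrefixOf]
      simp [hx]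
      have hf' : (t ++ ':' :: q).length ≤ f := by simp at hf ⊢; omega
      rw [ih f (x :: cur) acc ht hf']
      simp

lemma pvSplitMaxColon (p q : List Char) (h : ':' ∉ p) :
    PySem.Chars.splitOnMax (p ++ ':' :: q) [':'] 1 = [p, q] := by
  rw [PySem.Chars.splitOnMax]
  simp only [show ¬ ((1:Int) < 0) by norm_num, if_false]
  have := pvSplitMaxGo1 q p ((p ++ ':' :: q).length + 1) [] [] h (by omega)
  simpa using this

-- the "name" of a segment: A's split(':',1)[1]-or-whole equals B's seg[seg.find(':')+1:]
lemma pvNameEq (seg : List Char) :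
    (if PySem.Chars.isIn [':'] seg then (PySem.Chars.splitOnMax seg [':'] 1).getD 1 [] else seg)
      = PySem.List.slice seg (some (PySem.Chars.find seg [':'] + 1)) none := by
  by_cases hm : ':' ∈ seg
  · obtain ⟨p, q, hpq, hnp⟩ := pvFirstOcc ':' seg hm
    subst hpq
    have hin : PySem.Chars.isIn [':'] (p ++ ':' :: q) = true := by
      rw [PySem.Chars.isIn_iff_infix]
      exact ⟨p, q, by simp⟩
    have hfind := pvFindAt ':' p q hnp
    rw [hin, if_pos rfl, pvSplitMaxColon p q hnp, hfind,
        PySem.List.slice_from _ (by omega : (0:Int) ≤ (p.length : Int) + 1)]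
    have hnat : ((p.length : Int) + 1).toNat = p.length + 1 := by omega
    rw [hnat]
    simp
  · have hin : PySem.Chars.isIn [':'] seg = false := by
      rw [PySem.Chars.isIn_eq_false_iff]
      intro hinf
      exact hm (hinf.subset (List.mem_singleton_self ':'))
    rw [hin, if_neg (by simp), pvFindNot ':' seg hm,
        PySem.List.slice_from _ (by norm_num : (0:Int) ≤ -1 + 1)]
    simp

-- ---- split('>'): characterisation of PySem.Chars.splitOn cs ['>'] ----
-- reference split-on-'>' used only inside the proofs
def pvSgt : List Char → List (List Char)
  | [] => [[]]
  | c :: r =>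
    if c = '>' then [] :: pvSgt r
    else match pvSgt r with
      | [] => [[c]]
      | h :: t => (c :: h) :: t

lemma pvSgtNeNil (l : List Char) : pvSgt l ≠ [] := by
  cases l with
  | nil => simp [pvSgt]
  | cons c r =>
    rw [pvSgt]
    split
    · simp
    · split <;> simp

lemma pvSplitGo (fuel : Nat) : ∀ (l : List Char) (cur : List Char) (acc : List (List Char)),
    l.length ≤ fuel →
    PySem.Chars.splitOn.go ['>'] fuel l cur acc =
      acc.reverse ++ (match pvSgt l with
        | [] => [cur.reverse]
        | h :: t => (cur.reverse ++ h) :: t) := by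
  induction fuel with
  | zero =>
    intro l cur acc hl
    have : l = [] := List.length_eq_zero_iff.mp (Nat.le_zero.mp hl)
    subst this
    rw [PySem.Chars.splitOn.go.eq_def]
    simp [pvSgt]
  | succ f ih =>
    intro l cur acc hl
    cases l with
    | nil =>
      rw [PySem.Chars.splitOn.go.eq_def]
      simp [pvSgt]
    | cons x rest =>
      have hstep : PySem.Chars.splitOn.go ['>'] (f+1) (x::rest) cur acc =
          if ['>'].isPrefixOf (x::rest) then
            PySem.Chars.splitOn.go ['>'] f rest [] (cur.reverse::acc)
          else PySem.Chars.splitOn.go ['>'] f rest (x::cur) acc := rfl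
      rw [hstep]
      by_cases hx : x = '>'
      · subst hx
        rw [if_pos (by simp [List.isPrefixOf])]
        rw [ih rest [] (cur.reverse :: acc) (by simp at hl; omega)]
        rcases hsr : pvSgt rest with _ | ⟨h, t⟩
        · exact absurd hsr (pvSgtNeNil rest)
        · simp [pvSgt, hsr]
      · rw [if_neg (by simp [List.isPrefixOf]; exact fun he => hx he.symm)]
        rw [ih rest (x :: cur) acc (by simp at hl; omega)]
        rcases hsr : pvSgt rest with _ | ⟨h, t⟩
        · exact absurd hsr (pvSgtNeNil rest)
        · simp [pvSgt, hx, hsr]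

lemma pvSplitOnEq (cs : List Char) : PySem.Chars.splitOn cs ['>'] = pvSgt cs := by
  rw [PySem.Chars.splitOn]
  rw [pvSplitGo (cs.length + 1) cs [] [] (by omega)]
  rcases hsr : pvSgt cs with _ | ⟨h, t⟩
  · exact absurd hsr (pvSgtNeNil cs)
  · simp

lemma pvSgtNo (cs : List Char) (h : '>' ∉ cs) : pvSgt cs = [cs] := by
  induction cs with
  | nil => rfl
  | cons c r ih =>
    have hc : ¬ (c = '>') := by simp at h; tauto
    have hr : '>' ∉ r := by simp at h; tauto
    rw [pvSgt, if_neg hc, ih hr]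

lemma pvSgtApp (b : List Char) : ∀ (a : List Char), '>' ∉ a →
    pvSgt (a ++ '>' :: b) = a :: pvSgt b := by
  intro a
  induction a with
  | nil => intro _; simp [pvSgt]
  | cons c t ih =>
    intro h
    have hc : ¬ (c = '>') := by simp at h; tauto
    have ht : '>' ∉ t := by simp at h; tauto
    simp only [List.cons_append]
    rw [pvSgt, if_neg hc, ih ht]

-- ---- A's loop against B's per-part processing ----

-- a string without '>' passes through A unchanged (the unclosed-'<' / plain tail case)
lemma pvANoGt : ∀ (cs : List Char), '>' ∉ cs → pvFlaskA cs = cs := by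
  intro cs
  induction cs with
  | nil => intro _; rw [pvFlaskA]
  | cons c rest ih =>
    intro h
    have hr : '>' ∉ rest := by simp at h; tauto
    by_cases hc : c = '<'
    · subst hc
      rw [pvFlaskA]
      simp [pvFindNot '>' rest hr]
    · rw [pvFlaskA]
      simp [hc, ih hr]

-- B's per-part output on a part whose first '<' is after prefix p
lemma pvPartBYes (p q : List Char) (hnp : '<' ∉ p) :
    pvPartB (p ++ '<' :: q) =
      p ++ '{' :: (PySem.List.slice q (some (PySem.Chars.find q [':'] + 1)) none ++ ['}']) := by
  have hfind := pvFindAt '<' p q hnp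
  rw [pvPartB]
  simp only [hfind]
  rw [if_neg (by omega : ¬ ((p.length : Int) = -1))]
  rw [PySem.List.slice_from _ (by omega : (0:Int) ≤ (p.length : Int) + 1),
      PySem.List.slice_to _ (by omega : (0:Int) ≤ (p.length : Int))]
  have h1 : ((p.length : Int) + 1).toNat = p.length + 1 := by omega
  have h2 : ((p.length : Int)).toNat = p.length := by omega
  rw [h1, h2]
  simp

-- B's per-part output distributes over a leading non-'<' character
lemma pvPartBCons (c : Char) (a : List Char) (hc : c ≠ '<') :
    pvPartB (c :: a) = c :: pvPartB a := by
  by_cases hm : '<' ∈ a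
  · obtain ⟨p, q, hpq, hnp⟩ := pvFirstOcc '<' a hm
    subst hpq
    have hnp' : '<' ∉ c :: p := by
      simp [hnp]
      exact fun he => hc he.symm
    have e1 := pvPartBYes p q hnp
    have e2 := pvPartBYes (c :: p) q hnp'
    simp only [List.cons_append] at e2
    rw [e1, e2]
  · have hm' : '<' ∉ c :: a := by
      simp [hm]
      exact fun he => hc he.symm
    rw [pvPartB, pvPartB, pvFindNot '<' a hm, pvFindNot '<' (c :: a) hm']
    simp

-- A on (a ++ '>' :: b) with '>' ∉ a: one bracket-or-verbatim step, then the rest of the loop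
lemma pvAStep (b : List Char) : ∀ (a : List Char), '>' ∉ a →
    pvFlaskA (a ++ '>' :: b) = pvPartB a ++ pvFlaskA b := by
  intro a
  induction a with
  | nil =>
    intro _
    simp only [List.nil_append]
    rw [pvFlaskA]
    have : pvPartB [] = ['>'] := by
      rw [pvPartB]
      norm_num [PySem.Chars.find, PySem.Chars.find.go.eq_def]
    rw [this]
    simp
  | cons c t ih =>
    intro h
    have hc : ¬ (c = '>') := by simp at h; tauto
    have ht : '>' ∉ t := by simp at h; tauto
    by_cases hlt : c = '<'
    · subst hlt
      simp only [List.cons_append]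
      rw [pvFlaskA]
      have hfind : PySem.Chars.find (t ++ '>' :: b) ['>'] = (t.length : Int) := pvFindAt '>' t b ht
      rw [hfind, if_pos rfl, if_neg (by omega : ¬ ((t.length : Int) = -1))]
      rw [PySem.List.slice_to _ (by omega : (0:Int) ≤ (t.length : Int)),
          PySem.List.slice_from _ (by omega : (0:Int) ≤ (t.length : Int) + 1)]
      have h1 : ((t.length : Int)).toNat = t.length := by omega
      have h2 : ((t.length : Int) + 1).toNat = t.length + 1 := by omega
      rw [h1, h2]
      have htake : List.take t.length (t ++ '>' :: b) = t := by simp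
      have hdrop : List.drop (t.length + 1) (t ++ '>' :: b) = b := by simp
      rw [htake, hdrop]
      show '{' :: ((if PySem.Chars.isIn [':'] t = true then
          (PySem.Chars.splitOnMax t [':'] 1).getD 1 [] else t) ++ '}' :: pvFlaskA b)
        = pvPartB ('<' :: t) ++ pvFlaskA b
      rw [pvNameEq t]
      have := pvPartBYes [] t (by simp)
      simp only [List.nil_append] at this
      rw [this]
      simp
    · simp only [List.cons_append]
      rw [pvFlaskA]
      rw [if_neg hlt, ih ht, pvPartBCons c t hlt]
      simp

-- the whole of A equals the whole of B's body, by strong induction on the length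
lemma pvMain : ∀ (n : Nat) (cs : List Char), cs.length ≤ n →
    pvFlaskA cs = PySem.Chars.join []
      ((PySem.Chars.splitOn cs ['>']).dropLast.map pvPartB
        ++ [(PySem.Chars.splitOn cs ['>']).getLastD []]) := by
  intro n
  induction n with
  | zero =>
    intro cs hl
    have : cs = [] := List.length_eq_zero_iff.mp (Nat.le_zero.mp hl)
    subst this
    rw [pvFlaskA, pvSplitOnEq]
    simp [pvSgt]
  | succ m ih =>
    intro cs hl
    by_cases hm : '>' ∈ cs
    · obtain ⟨a, b, hab, hna⟩ := pvFirstOcc '>' cs hm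
      subst hab
      rw [pvSplitOnEq, pvSgtApp b a hna, pvAStep b a hna]
      rcases hsb : pvSgt b with _ | ⟨h, t⟩
      · exact absurd hsb (pvSgtNeNil b)
      · have ihb := ih b (by simp at hl; omega)
        rw [pvSplitOnEq, hsb] at ihb
        rw [ihb]
        rw [pvJoinNil, pvJoinNil]
        simp
    · rw [pvSplitOnEq, pvSgtNo cs hm, pvANoGt cs hm]
      simp [PySem.Chars.join, List.intercalate]

-- ===== VERDICT (by name: the statement is the Claim_ definition above) =====
theorem flask_rule_to_openapi_path_py_spec : Claim_equal_flask_rule_to_openapi_path_py := by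
  intro rule _
  unfold Spec_flask_rule_to_openapi_path_py
  unfold flask_rule_to_openapi_path_py flask_rule_to_openapi_path_py_alt
  exact congrArg String.mk (pvMain rule.toList.length rule.toList le_rfl)
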